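-- pv_equiv track=rewrite | github.com/CASY82/CHH_StudyRoom | Algo/Baekjoon_Bronze(Implement)/Baek_9288.py | find_dice_combinations
-- ===== SOURCE A (Python) =====
-- def find_dice_combinations(sum_value):
--     combinations = []
--     for die1 in range(1, 7):
--         die2 = sum_value - die1
--         if 1 <= die2 <= 6:
--             combinations.append((die1, die2))
--
--     length = len(combinations)
--
--     if length % 2 == 0:
--         combinations = combinations[:length // 2]
--     else:
--         combinations = combinations[:length // 2 + 1]
--
--     return combinations
-- ===== SOURCE B (Python) =====
-- def find_dice_combinations(sum_value):
--     lo = max(1, sum_value - 6)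
--     hi = min(6, sum_value - 1)
--     length = hi - lo + 1 if hi >= lo else 0
--     half = (length + 1) // 2
--     return [(lo + i, sum_value - lo - i) for i in range(half)]
-- ===== Notes on version B (the rewrite author's own statement) =====
-- stated objective: simpler
-- what changed: Replaces the scan over all six die1 values plus a parity-split slice with a closed-form valid range [lo,hi] and direct generation of only the ceil(length/2) first-half pairs.
import Mathlib
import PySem

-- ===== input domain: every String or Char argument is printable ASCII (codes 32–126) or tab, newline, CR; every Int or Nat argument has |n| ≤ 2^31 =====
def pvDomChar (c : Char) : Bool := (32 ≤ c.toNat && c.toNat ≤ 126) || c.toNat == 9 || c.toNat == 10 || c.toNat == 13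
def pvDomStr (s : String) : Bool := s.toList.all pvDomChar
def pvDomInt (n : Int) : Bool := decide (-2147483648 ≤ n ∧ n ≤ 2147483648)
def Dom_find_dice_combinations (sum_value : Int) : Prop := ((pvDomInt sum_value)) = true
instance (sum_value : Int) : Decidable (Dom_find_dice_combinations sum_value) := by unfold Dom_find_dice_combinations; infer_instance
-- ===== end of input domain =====

-- B replaces A's scan of all six die1 values and slice with a closed-form range and direct first-half generation (objective: simpler).

-- ===== PORT A =====
def find_dice_combinations (sum_value : Int) : List (Int × Int) :=
  let combinations : List (Int × Int) :=
    (PySem.List.pyRange 1 7 1).foldl (fun acc die1 =>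
      let die2 := sum_value - die1
      if 1 ≤ die2 ∧ die2 ≤ 6 then acc ++ [(die1, die2)] else acc) []
  let length : Int := (combinations.length : Int)
  if length % 2 = 0 then
    PySem.List.slice combinations none (some (PySem.Int.floordiv length 2))
  else
    PySem.List.slice combinations none (some (PySem.Int.floordiv length 2 + 1))

-- ===== PORT B =====
def find_dice_combinations_alt (sum_value : Int) : List (Int × Int) :=
  let lo : Int := max 1 (sum_value - 6)
  let hi : Int := min 6 (sum_value - 1)
  let length : Int := if hi ≥ lo then hi - lo + 1 else 0
  let half : Int := PySem.Int.floordiv (length + 1) 2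
  (PySem.List.pyRange 0 half 1).map (fun i => (lo + i, sum_value - lo - i))

-- ===== PRECONDITION & SPEC =====
def Spec_find_dice_combinations (sum_value : Int) (out : List (Int × Int)) : Prop := out = find_dice_combinations_alt sum_value
instance (sum_value : Int) (out : List (Int × Int)) : Decidable (Spec_find_dice_combinations sum_value out) := by unfold Spec_find_dice_combinations; infer_instance

-- ===== CLAIM (what is proved, stated in full; the proofs are below) =====
def Claim_equal_find_dice_combinations : Prop := ∀ (sum_value : Int), Dom_find_dice_combinations sum_value → Spec_find_dice_combinations sum_value (find_dice_combinations sum_value)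

-- ===== LEMMAS AND PROOFS =====

theorem fdc_empty (s : Int) (h : s < 2 ∨ 12 < s) : find_dice_combinations s = [] := by
  have h1 : ¬(1 ≤ s - 1 ∧ s - 1 ≤ 6) := by omega
  have h2 : ¬(1 ≤ s - 2 ∧ s - 2 ≤ 6) := by omega
  have h3 : ¬(1 ≤ s - 3 ∧ s - 3 ≤ 6) := by omega
  have h4 : ¬(1 ≤ s - 4 ∧ s - 4 ≤ 6) := by omega
  have h5 : ¬(1 ≤ s - 5 ∧ s - 5 ≤ 6) := by omega
  have h6 : ¬(1 ≤ s - 6 ∧ s - 6 ≤ 6) := by omega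
  simp only [find_dice_combinations,
    show PySem.List.pyRange 1 7 1 = [1, 2, 3, 4, 5, 6] from by decide, List.foldl,
    if_neg h1, if_neg h2, if_neg h3, if_neg h4, if_neg h5, if_neg h6]
  decide

theorem fdc_alt_empty (s : Int) (h : s < 2 ∨ 12 < s) : find_dice_combinations_alt s = [] := by
  have hneg : ¬(min 6 (s - 1) ≥ max 1 (s - 6)) := by omega
  simp only [find_dice_combinations_alt, if_neg hneg,
    show PySem.Int.floordiv ((0 : Int) + 1) 2 = 0 from by decide,
    show PySem.List.pyRange 0 0 1 = ([] : List Int) from by decide, List.map]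

-- ===== VERDICT (by name: the statement is the Claim_ definition above) =====
theorem find_dice_combinations_spec : Claim_equal_find_dice_combinations := by
  intro s _
  unfold Spec_find_dice_combinations
  by_cases hlo : s < 2
  · rw [fdc_empty s (Or.inl hlo), fdc_alt_empty s (Or.inl hlo)]
  by_cases hhi : 12 < s
  · rw [fdc_empty s (Or.inr hhi), fdc_alt_empty s (Or.inr hhi)]
  have h2 : 2 ≤ s := by omega
  have h12 : s ≤ 12 := by omega
  interval_cases s <;> decide
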